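-- pv_equiv track=rewrite | github.com/Jaong/TeamLLM-anonymous | Process_Results/Extract_Scores.py | find_human_pairs
-- ===== SOURCE A (Python) =====
-- from collections import defaultdict
-- from itertools import combinations
--
-- def find_human_pairs(allocation, fs_order = None):
--     '''
--     Return the human rater IDs for all scenarios in the format: (H1_ID, H1_FS, H2_ID, H2_FS).
--     '''
--     fs_to_humans = defaultdict(list)
--     for human, fs_list in allocation.items():
--         for fs in fs_list:
--             fs_to_humans[fs].append(human)
--     if fs_order is None:
--         fs_order = sorted(fs_to_humans.keys())
--
--     pairs = []
--     for fs in fs_order: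
--         humans = fs_to_humans.get(fs, [])
--         assert len(humans) == 2
--         for h1, h2 in combinations(humans, 2):
--             pairs.append((h1, fs, h2, fs))
--
--     return pairs
-- ===== SOURCE B (Python) =====
-- def find_human_pairs(allocation, fs_order=None):
--     '''
--     Return the human rater IDs for all scenarios in the format: (H1_ID, H1_FS, H2_ID, H2_FS).
--     '''
--     if fs_order is None:
--         seen = set()
--         for fs_list in allocation.values():
--             seen.update(fs_list)
--         fs_order = sorted(seen)
--     pairs = []
--     for fs in fs_order:
--         humans = []
--         for human, fs_list in allocation.items():
--             humans += [human] * fs_list.count(fs)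
--         assert len(humans) == 2
--         pairs.append((humans[0], fs, humans[1], fs))
--     return pairs
-- ===== Notes on version B (the rewrite author's own statement) =====
-- stated objective: alternative
-- what changed: B drops A's inverted fs->humans index entirely: per scenario it rescans allocation.items() counting occurrences of that fs, and emits the single (h1, fs, h2, fs) pair directly instead of via itertools.combinations.
import Mathlib
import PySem

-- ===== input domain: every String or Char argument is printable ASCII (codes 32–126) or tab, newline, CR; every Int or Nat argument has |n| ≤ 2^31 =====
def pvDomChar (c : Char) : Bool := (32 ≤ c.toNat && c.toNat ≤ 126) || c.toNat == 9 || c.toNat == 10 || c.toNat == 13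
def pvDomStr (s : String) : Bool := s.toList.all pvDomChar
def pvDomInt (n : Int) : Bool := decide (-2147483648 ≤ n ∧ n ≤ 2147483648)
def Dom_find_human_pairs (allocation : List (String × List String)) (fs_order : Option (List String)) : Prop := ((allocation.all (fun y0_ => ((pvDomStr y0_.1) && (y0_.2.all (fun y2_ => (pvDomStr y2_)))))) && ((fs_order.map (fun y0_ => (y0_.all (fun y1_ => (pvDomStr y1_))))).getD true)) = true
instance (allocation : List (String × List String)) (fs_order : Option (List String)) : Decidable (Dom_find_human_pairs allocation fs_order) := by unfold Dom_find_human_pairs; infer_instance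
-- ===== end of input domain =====

-- B replaces A's inverted fs->humans index by a per-scenario rescan of the allocation,
-- emitting each (h1, fs, h2, fs) pair directly instead of via itertools.combinations (alternative decomposition, same results).


-- ===== PORT A =====
-- itertools.combinations(xs, 2): all (xs[i], xs[j]) with i < j, in lexicographic index order
def pyCombinations2 {α : Type} (xs : List α) : List (α × α) :=
  match xs with
  | [] => []
  | x :: rest => rest.map (fun y => (x, y)) ++ pyCombinations2 rest

def find_human_pairs (allocation : List (String × List String)) (fs_order : Option (List String)) : List (String × String × String × String) :=
  let fs_to_humans : PySem.Dict String (List String) :=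
    allocation.foldl (fun d p => p.2.foldl (fun d fs => d.modify fs [] (fun hs => hs ++ [p.1])) d) PySem.Dict.empty
  let order : List String :=
    match fs_order with
    | none => PySem.List.sorted (PySem.Dict.keys fs_to_humans) (fun x => x) false
    | some l => l
  -- 'assert len(humans) == 2' raises where the test fails; Pre_ excludes those inputs, the port skips that fs
  order.foldl (fun pairs fs =>
    let humans := fs_to_humans.getD fs []
    if humans.length = 2 then
      pairs ++ (pyCombinations2 humans).map (fun h => (h.1, fs, h.2, fs))
    else pairs) []

-- ===== PORT B =====
def find_human_pairs_alt (allocation : List (String × List String)) (fs_order : Option (List String)) : List (String × String × String × String) :=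
  let order : List String :=
    match fs_order with
    | none => PySem.List.sorted (allocation.foldl (fun s p => PySem.Set.update s p.2) PySem.Set.empty) (fun x => x) false
    | some l => l
  -- 'assert len(humans) == 2' raises where the test fails; Pre_ excludes those inputs, the port skips that fs
  order.foldl (fun pairs fs =>
    let humans := allocation.foldl (fun hs p => hs ++ List.replicate (p.2.count fs) p.1) ([] : List String)
    match humans with
    | [h1, h2] => pairs ++ [(h1, fs, h2, fs)]
    | _ => pairs) []

-- ===== PRECONDITION & SPEC =====
-- Pre_ excludes exactly the inputs on which A's 'assert len(humans) == 2' raises AssertionError: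
-- every scenario of the effective fs_order must occur exactly twice across the allocation's fs lists.
def Pre_find_human_pairs (allocation : List (String × List String)) (fs_order : Option (List String)) : Prop :=
  ∀ fs ∈ (match fs_order with
          | none => allocation.flatMap (fun (p : String × List String) => p.2)
          | some l => l),
    (allocation.map (fun p => p.2.count fs)).sum = 2
instance (allocation : List (String × List String)) (fs_order : Option (List String)) : Decidable (Pre_find_human_pairs allocation fs_order) := by unfold Pre_find_human_pairs; infer_instance

def pvWitness_find_human_pairs : (List (String × List String)) × Option (List String) :=
  ([("alice", ["s1", "s2"]), ("bob", ["s2", "s1"])], none)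

def Spec_find_human_pairs (allocation : List (String × List String)) (fs_order : Option (List String)) (out : List (String × String × String × String)) : Prop := out = find_human_pairs_alt allocation fs_order
instance (allocation : List (String × List String)) (fs_order : Option (List String)) (out : List (String × String × String × String)) : Decidable (Spec_find_human_pairs allocation fs_order out) := by unfold Spec_find_human_pairs; infer_instance

-- ===== CLAIM (what is proved, stated in full; the proofs are below) =====
def Claim_equal_find_human_pairs : Prop := ∀ (allocation : List (String × List String)) (fs_order : Option (List String)), Dom_find_human_pairs allocation fs_order → Pre_find_human_pairs allocation fs_order → Spec_find_human_pairs allocation fs_order (find_human_pairs allocation fs_order)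

-- ===== LEMMAS AND PROOFS =====

-- A's nested grouping loop is the flat modify-loop over the (fs, human) pairs of the allocation
lemma dictA_eq_flat (allocation : List (String × List String)) (d : PySem.Dict String (List String)) :
    allocation.foldl (fun d p => p.2.foldl (fun d fs => d.modify fs [] (fun hs => hs ++ [p.1])) d) d
      = (allocation.flatMap (fun p => p.2.map (fun fs => (fs, p.1)))).foldl
          (fun d q => d.modify q.1 [] (fun hs => hs ++ [q.2])) d := by
  induction allocation generalizing d with
  | nil => rfl
  | cons p rest ih =>
      simp only [List.foldl_cons, List.flatMap_cons, List.foldl_append, ih]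
      congr 1
      generalize d = d0
      induction p.2 generalizing d0 with
      | nil => rfl
      | cons fs t ih2 => simp [ih2]

-- B's per-fs scan computes exactly A's bucket for fs
lemma humans_eq (allocation : List (String × List String)) (fs : String) :
    allocation.foldl (fun hs p => hs ++ List.replicate (p.2.count fs) p.1) ([] : List String)
      = ((allocation.flatMap (fun p => p.2.map (fun f => (f, p.1)))).filter (fun q => q.1 == fs)).map (fun q => q.2) := by
  rw [PySem.List.foldl_append_eq_flatMap]
  simp only [List.nil_append, List.filter_flatMap, List.map_flatMap]
  congr 1; funext p
  simp only [List.filter_map, List.map_map, Function.comp_def, List.count]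
  induction p.2 with
  | nil => rfl
  | cons a t ih =>
      by_cases h : a == fs
      · simp [h, ih, List.replicate_succ]
      · simp [h, ih]

-- the length of the bucket is the total occurrence count of fs across the allocation
lemma humans_len (allocation : List (String × List String)) (fs : String) :
    (((allocation.flatMap (fun p => p.2.map (fun f => (f, p.1)))).filter (fun q => q.1 == fs)).map (fun q => q.2)).length
      = (allocation.map (fun p => p.2.count fs)).sum := by
  rw [← humans_eq, PySem.List.foldl_append_eq_flatMap]
  simp [List.length_flatMap]

-- B's seen-set loop flattened
lemma setfold_eq (allocation : List (String × List String)) (s : PySem.Set String) :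
    allocation.foldl (fun s p => PySem.Set.update s p.2) s
      = PySem.Set.update s (allocation.flatMap (fun p => p.2)) := by
  induction allocation generalizing s with
  | nil => rfl
  | cons p rest ih =>
      simp only [List.foldl_cons, List.flatMap_cons]
      rw [ih]
      simp [PySem.Set.update, List.foldl_append]

-- both 'None' branches compute the same scenario order
lemma order_eq (allocation : List (String × List String)) :
    PySem.List.sorted (PySem.Dict.keys
        (allocation.foldl (fun d p => p.2.foldl (fun d fs => d.modify fs [] (fun hs => hs ++ [p.1])) d) PySem.Dict.empty))
        (fun x => x) false
      = PySem.List.sorted (allocation.foldl (fun s p => PySem.Set.update s p.2) PySem.Set.empty) (fun x => x) false := by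
  rw [dictA_eq_flat, setfold_eq]
  rw [PySem.Dict.keys_foldl_modify_key (key := fun q : String × String => q.1)]
  simp [PySem.Set.update, List.map_flatMap, Function.comp_def]

-- one loop step: for each admitted fs both programs append the same single pair
lemma step_eq (allocation : List (String × List String)) (fs : String)
    (h2 : (allocation.map (fun p => p.2.count fs)).sum = 2) (pairs : List (String × String × String × String)) :
    (if ((allocation.foldl (fun d p => p.2.foldl (fun d fs => d.modify fs [] (fun hs => hs ++ [p.1])) d) PySem.Dict.empty).getD fs []).length = 2 then
       pairs ++ (pyCombinations2 ((allocation.foldl (fun d p => p.2.foldl (fun d fs => d.modify fs [] (fun hs => hs ++ [p.1])) d) PySem.Dict.empty).getD fs [])).map (fun h => (h.1, fs, h.2, fs))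
     else pairs)
    = (match allocation.foldl (fun hs p => hs ++ List.replicate (p.2.count fs) p.1) ([] : List String) with
       | [h1, h2] => pairs ++ [(h1, fs, h2, fs)]
       | _ => pairs) := by
  have hget : (allocation.foldl (fun d p => p.2.foldl (fun d fs => d.modify fs [] (fun hs => hs ++ [p.1])) d) PySem.Dict.empty).getD fs []
      = allocation.foldl (fun hs p => hs ++ List.replicate (p.2.count fs) p.1) ([] : List String) := by
    rw [dictA_eq_flat, humans_eq, PySem.Dict.getD_foldl_modify_append]
    simp
  have hlen : (allocation.foldl (fun hs p => hs ++ List.replicate (p.2.count fs) p.1) ([] : List String)).length = 2 := by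
    rw [humans_eq, humans_len, h2]
  obtain ⟨h1, h2', hH⟩ := List.length_eq_two.mp hlen
  rw [hget, hH]
  simp [pyCombinations2]

-- ===== VERDICT (by name: the statement is the Claim_ definition above) =====
theorem find_human_pairs_spec : Claim_equal_find_human_pairs := by
  intro allocation fs_order _ hpre
  unfold Spec_find_human_pairs find_human_pairs find_human_pairs_alt
  simp only []
  cases fs_order with
  | some l =>
      exact PySem.List.foldl_congr_mem' _ _ _ _ (fun fs hfs pairs => step_eq allocation fs (hpre fs hfs) pairs)
  | none =>
      rw [order_eq]
      refine PySem.List.foldl_congr_mem' _ _ _ _ (fun fs hfs pairs => step_eq allocation fs ?_ pairs)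
      apply hpre
      have := (PySem.List.mem_sorted _ (fun y => y) false fs).mp hfs
      rw [setfold_eq] at this
      have hx2 : fs ∈ PySem.Set.ofList (allocation.flatMap (fun p => p.2)) := by
        simpa [PySem.Set.ofList_eq_foldl, PySem.Set.update, PySem.Set.empty] using this
      exact (PySem.Set.mem_ofList _ fs).mp hx2
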